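-- pv_equiv track=rewrite | github.com/diegovaloismr/trading-terminal | services/news.py | filtrar_noticias_relevantes
-- ===== SOURCE A (Python) =====
-- def filtrar_noticias_relevantes(noticias):
--     palavras_chave = [
--         "inflation", "interest rate", "fed",
--         "central bank", "recession", "gdp",
--         "oil", "war", "china", "unemployment"
--     ]
--
--     relevantes = []
--
--     for n in noticias:
--         for palavra in palavras_chave:
--             if palavra.lower() in n.lower():
--                 relevantes.append(n)
--                 break
--
--     return relevantes
-- ===== SOURCE B (Python) =====
-- def filtrar_noticias_relevantes(noticias):
--     palavras_chave = [
--         "inflation", "interest rate", "fed",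
--         "central bank", "recession", "gdp",
--         "oil", "war", "china", "unemployment"
--     ]
--
--     lowered = [n.lower() for n in noticias]
--     hits = set()
--     for palavra in palavras_chave:
--         for i, texto in enumerate(lowered):
--             if palavra in texto:
--                 hits.add(i)
--
--     return [n for i, n in enumerate(noticias) if i in hits]
-- ===== Notes on version B (the rewrite author's own statement) =====
-- stated objective: alternative
-- what changed: Inverts the traversal: instead of news-major loops with break and an accumulator list, B loops keyword-major over pre-lowered texts collecting the set of matching indices, then emits the news whose index is in the set, in original order.
import Mathlib
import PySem

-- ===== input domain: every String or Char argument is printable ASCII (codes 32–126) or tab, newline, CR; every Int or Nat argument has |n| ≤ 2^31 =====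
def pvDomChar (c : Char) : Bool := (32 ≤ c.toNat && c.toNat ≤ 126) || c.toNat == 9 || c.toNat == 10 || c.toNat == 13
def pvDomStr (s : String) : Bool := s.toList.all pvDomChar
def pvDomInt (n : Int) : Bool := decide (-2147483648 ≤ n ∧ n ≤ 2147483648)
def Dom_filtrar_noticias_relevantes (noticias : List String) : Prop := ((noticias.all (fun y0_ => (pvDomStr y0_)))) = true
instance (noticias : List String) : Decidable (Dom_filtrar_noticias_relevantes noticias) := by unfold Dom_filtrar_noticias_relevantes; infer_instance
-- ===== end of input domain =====

-- B inverts A's traversal: keyword-major loops collect the set of matching indices over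
-- pre-lowered texts, then news with a hit index are emitted in original order; objective: alternative.

-- ===== PORT A =====
def pvPalavras : List String :=
  ["inflation", "interest rate", "fed",
   "central bank", "recession", "gdp",
   "oil", "war", "china", "unemployment"]

-- inner 'for palavra … break' loop of A
def pvLoopA (n : String) (acc : List String) : List String → List String
  | [] => acc
  | p :: ps =>
      if PySem.Str.isIn (PySem.Str.lower p) (PySem.Str.lower n) then acc ++ [n]
      else pvLoopA n acc ps

def filtrar_noticias_relevantes (noticias : List String) : List String :=
  noticias.foldl (fun acc n => pvLoopA n acc pvPalavras) []

-- ===== PORT B =====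
def pvChaves : List String :=
  ["inflation", "interest rate", "fed",
   "central bank", "recession", "gdp",
   "oil", "war", "china", "unemployment"]

def filtrar_noticias_relevantes_alt (noticias : List String) : List String :=
  let lowered := noticias.map PySem.Str.lower
  let hits : PySem.Set Int :=
    pvChaves.foldl (fun s palavra =>
      (PySem.List.enumerate lowered 0).foldl (fun s p =>
        if PySem.Str.isIn palavra p.2 then PySem.Set.add s p.1 else s) s)
      PySem.Set.empty
  ((PySem.List.enumerate noticias 0).filter (fun p => PySem.Set.contains hits p.1)).map (·.2)

-- ===== PRECONDITION & SPEC =====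
def Spec_filtrar_noticias_relevantes (noticias : List String) (out : List String) : Prop := out = filtrar_noticias_relevantes_alt noticias
instance (noticias : List String) (out : List String) : Decidable (Spec_filtrar_noticias_relevantes noticias out) := by unfold Spec_filtrar_noticias_relevantes; infer_instance

-- ===== CLAIM =====
def Claim_equal_filtrar_noticias_relevantes : Prop := ∀ (noticias : List String), Dom_filtrar_noticias_relevantes noticias → Spec_filtrar_noticias_relevantes noticias (filtrar_noticias_relevantes noticias)

-- ===== LEMMAS AND PROOFS =====

-- the relevance predicate both sides compute
def pvRel (n : String) : Bool :=
  pvChaves.any (fun palavra => PySem.Str.isIn palavra (PySem.Str.lower n))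

lemma pvPalavras_lower : ∀ p ∈ pvPalavras, PySem.Str.lower p = p := by decide

-- A-side: the inner break loop is an 'any' test
lemma pvLoopA_eq (n : String) (kw : List String) (acc : List String) :
    pvLoopA n acc kw =
      if kw.any (fun p => PySem.Str.isIn (PySem.Str.lower p) (PySem.Str.lower n)) then acc ++ [n]
      else acc := by
  induction kw with
  | nil => simp [pvLoopA]
  | cons p ps ih =>
      simp only [pvLoopA, List.any_cons, Bool.or_eq_true]
      by_cases h : PySem.Str.isIn (PySem.Str.lower p) (PySem.Str.lower n) = true
      · rw [if_pos h, if_pos (Or.inl h)]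
      · rw [if_neg h, ih]
        by_cases h2 : (ps.any fun p => PySem.Str.isIn (PySem.Str.lower p) (PySem.Str.lower n)) = true
        · rw [if_pos h2, if_pos (Or.inr h2)]
        · rw [if_neg h2, if_neg (by tauto)]

lemma pvAny_eq_rel (n : String) :
    pvPalavras.any (fun p => PySem.Str.isIn (PySem.Str.lower p) (PySem.Str.lower n)) = pvRel n := by
  rw [Bool.eq_iff_iff]
  unfold pvRel
  simp only [List.any_eq_true]
  constructor
  · rintro ⟨p, hp, h⟩; exact ⟨p, hp, by rwa [pvPalavras_lower p hp] at h⟩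
  · rintro ⟨p, hp, h⟩; exact ⟨p, hp, by rwa [pvPalavras_lower p hp]⟩

lemma fold_eq_filter (l : List String) (acc : List String) :
    l.foldl (fun acc n => pvLoopA n acc pvPalavras) acc = acc ++ l.filter pvRel := by
  induction l generalizing acc with
  | nil => simp
  | cons n ns ih =>
      simp only [List.foldl_cons, List.filter_cons]
      rw [pvLoopA_eq, pvAny_eq_rel]
      by_cases h : pvRel n = true
      · simp [h, ih]
      · simp [h, ih]

-- B-side: membership in one inner fold
lemma mem_inner_fold {β : Type} (c : β → Bool) (f : β → Int) (l : List β)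
    (s : PySem.Set Int) (x : Int) :
    x ∈ l.foldl (fun s p => if c p then PySem.Set.add s (f p) else s) s ↔
      x ∈ s ∨ ∃ p ∈ l, c p ∧ x = f p := by
  induction l generalizing s with
  | nil => simp
  | cons p ps ih =>
      simp only [List.foldl_cons]
      by_cases h : c p = true
      · rw [if_pos h, ih]
        simp only [PySem.Set.mem_add, List.mem_cons]
        constructor
        · rintro (⟨hs | he⟩ | ⟨q, hq, hc, hx⟩)
          · exact Or.inl hs
          · exact Or.inr ⟨p, Or.inl rfl, h, he⟩
          · exact Or.inr ⟨q, Or.inr hq, hc, hx⟩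
        · rintro (hs | ⟨q, (rfl | hq), hc, hx⟩)
          · exact Or.inl (Or.inl hs)
          · exact Or.inl (Or.inr hx)
          · exact Or.inr ⟨q, hq, hc, hx⟩
      · rw [if_neg h, ih]
        simp only [List.mem_cons]
        constructor
        · rintro (hs | ⟨q, hq, hc, hx⟩)
          · exact Or.inl hs
          · exact Or.inr ⟨q, Or.inr hq, hc, hx⟩
        · rintro (hs | ⟨q, (rfl | hq), hc, hx⟩)
          · exact Or.inl hs
          · exact absurd hc (by simp [h])
          · exact Or.inr ⟨q, hq, hc, hx⟩

-- membership in the whole hits set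
lemma mem_hits (lowered : List String) (x : Int) :
    x ∈ pvChaves.foldl (fun s palavra =>
        (PySem.List.enumerate lowered 0).foldl (fun s p =>
          if PySem.Str.isIn palavra p.2 then PySem.Set.add s p.1 else s) s)
        PySem.Set.empty ↔
      ∃ palavra ∈ pvChaves, ∃ p ∈ PySem.List.enumerate lowered 0,
        PySem.Str.isIn palavra p.2 ∧ x = p.1 := by
  have gen : ∀ (kws : List String) (s : PySem.Set Int),
      x ∈ kws.foldl (fun s palavra =>
          (PySem.List.enumerate lowered 0).foldl (fun s p =>
            if PySem.Str.isIn palavra p.2 then PySem.Set.add s p.1 else s) s) s ↔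
        x ∈ s ∨ ∃ palavra ∈ kws, ∃ p ∈ PySem.List.enumerate lowered 0,
          PySem.Str.isIn palavra p.2 ∧ x = p.1 := by
    intro kws
    induction kws with
    | nil => simp
    | cons k ks ih =>
        intro s
        rw [List.foldl_cons, ih,
          mem_inner_fold (fun p : Int × String => PySem.Str.isIn k p.2)
            (fun p : Int × String => p.1)]
        simp only [List.mem_cons]
        constructor
        · rintro (⟨hs | ⟨p, hp, hc, hx⟩⟩ | ⟨w, hw, p, hp, hc, hx⟩)
          · exact Or.inl hs
          · exact Or.inr ⟨k, Or.inl rfl, p, hp, hc, hx⟩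
          · exact Or.inr ⟨w, Or.inr hw, p, hp, hc, hx⟩
        · rintro (hs | ⟨w, (rfl | hw), p, hp, hc, hx⟩)
          · exact Or.inl (Or.inl hs)
          · exact Or.inl (Or.inr ⟨p, hp, hc, hx⟩)
          · exact Or.inr ⟨w, hw, p, hp, hc, hx⟩
  rw [gen]
  simp [PySem.Set.empty]

-- the hit-index test agrees with pvRel at every valid index
lemma contains_hits_eq (noticias : List String) (k : Nat) (hk : k < noticias.length) :
    PySem.Set.contains
      (pvChaves.foldl (fun s palavra =>
        (PySem.List.enumerate (noticias.map PySem.Str.lower) 0).foldl (fun s p =>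
          if PySem.Str.isIn palavra p.2 then PySem.Set.add s p.1 else s) s)
        PySem.Set.empty) ((0 : Int) + k) = pvRel noticias[k] := by
  rw [Bool.eq_iff_iff, PySem.Set.contains_iff, mem_hits]
  unfold pvRel
  simp only [PySem.List.mem_enumerate_iff, List.any_eq_true]
  constructor
  · rintro ⟨w, hw, p, ⟨j, hj, rfl⟩, hc, hx⟩
    have : k = j := by simpa using hx
    subst this
    refine ⟨w, hw, ?_⟩
    simpa [List.getElem_map] using hc
  · rintro ⟨w, hw, hc⟩
    exact ⟨w, hw, ((0 : Int) + k, (noticias.map PySem.Str.lower)[k]'(by simpa using hk)),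
      ⟨k, by simpa using hk, rfl⟩, by simpa [List.getElem_map] using hc, rfl⟩

-- filtering enumerate by an index predicate = filtering the list by the element predicate
lemma filter_enumerate_eq {α : Type} (q : Int → Bool) (r : α → Bool) (xs : List α) (s : Int)
    (h : ∀ (k : Nat) (hk : k < xs.length), q (s + k) = r xs[k]) :
    ((PySem.List.enumerate xs s).filter (fun p => q p.1)).map (·.2) = xs.filter r := by
  induction xs generalizing s with
  | nil => simp [PySem.List.enumerate_nil]
  | cons x xs ih =>
      rw [PySem.List.enumerate_cons]
      have h0 : q s = r x := by simpa using h 0 (by simp)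
      have hrest : ∀ (k : Nat) (hk : k < xs.length), q (s + 1 + k) = r xs[k] := by
        intro k hk
        have := h (k + 1) (by simpa using Nat.succ_lt_succ hk)
        simpa [add_assoc, add_comm, add_left_comm] using this
      simp only [List.filter_cons]
      by_cases hx : r x = true
      · simp only [h0, hx, if_pos]
        simp [List.map_cons, ih (s + 1) hrest]
      · have : q s = false := by rw [h0]; simpa using hx
        simp [this, hx, ih (s + 1) hrest]

-- B computes the same filter
lemma alt_eq_filter (noticias : List String) :
    filtrar_noticias_relevantes_alt noticias = noticias.filter pvRel := by
  unfold filtrar_noticias_relevantes_alt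
  exact filter_enumerate_eq _ _ noticias 0 (fun k hk => contains_hits_eq noticias k hk)

-- ===== VERDICT =====
theorem filtrar_noticias_relevantes_spec : Claim_equal_filtrar_noticias_relevantes := by
  intro noticias _
  show filtrar_noticias_relevantes noticias = filtrar_noticias_relevantes_alt noticias
  rw [filtrar_noticias_relevantes, alt_eq_filter, fold_eq_filter]
  simp
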